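-- pv_equiv track=rewrite | github.com/frostygood/proxy-openai-api | main.py | _is_allowed_path
-- ===== SOURCE A (Python) =====
-- def _is_allowed_path(path: str) -> bool:
--     normalized = path.lstrip("/")
--     exact = {"chat/completions", "completions", "embeddings"}
--     prefixes = {"responses", "images", "audio"}
--
--     if normalized in exact:
--         return True
--
--     for prefix in prefixes:
--         if normalized == prefix or normalized.startswith(prefix + "/"):
--             return True
--
--     return False
-- ===== SOURCE B (Python) =====
-- def _is_allowed_path(path: str) -> bool:
--     segs = path.lstrip("/").split("/")
--     head, tail = segs[0], segs[1:]
--     kind = {"completions": 0, "embeddings": 0, "responses": 1,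
--             "images": 1, "audio": 1, "chat": 2}.get(head)
--     if kind == 0:
--         return not tail
--     if kind == 1:
--         return True
--     if kind == 2:
--         return tail == ["completions"]
--     return False
-- ===== Notes on version B (the rewrite author's own statement) =====
-- stated objective: alternative
-- what changed: Instead of an exact-set membership plus a startswith-scan over a prefix set, B fully segments the path at slashes and classifies the first segment through a rule table of arity classes (exact-no-tail, any-tail, tail must be exactly the completions segment), checking the tail shape accordingly.
import Mathlib
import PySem

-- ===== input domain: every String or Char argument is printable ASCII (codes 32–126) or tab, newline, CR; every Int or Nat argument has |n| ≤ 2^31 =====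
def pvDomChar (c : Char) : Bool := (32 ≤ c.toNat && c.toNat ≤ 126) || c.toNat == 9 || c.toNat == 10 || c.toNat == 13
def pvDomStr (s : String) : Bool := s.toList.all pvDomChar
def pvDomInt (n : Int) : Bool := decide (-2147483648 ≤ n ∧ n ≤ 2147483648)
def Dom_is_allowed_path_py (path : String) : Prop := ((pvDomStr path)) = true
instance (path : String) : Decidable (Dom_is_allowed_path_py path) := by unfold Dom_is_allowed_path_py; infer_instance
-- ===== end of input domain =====

-- B replaces A's exact-set + startswith-scan by full segmentation: split('/') once,
-- classify the first segment with a rule table (no-tail / any-tail / tail=["completions"]) (objective: alternative).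


-- ===== PORT A =====
def pvExactA : PySem.Set (List Char) :=
  PySem.Set.ofList ["chat/completions".toList, "completions".toList, "embeddings".toList]
def pvPrefixesA : PySem.Set (List Char) :=
  PySem.Set.ofList ["responses".toList, "images".toList, "audio".toList]

def is_allowed_path_py (path : String) : Bool :=
  -- path.lstrip("/"): hand port, exact — drops exactly the leading '/' characters
  let normalized := path.toList.dropWhile (fun c => c == '/')
  if PySem.Set.contains pvExactA normalized then true
  else if pvPrefixesA.any
      (fun prefix_ => normalized == prefix_ || PySem.Chars.startswith normalized (prefix_ ++ ['/'])) then
    -- the for loop returns True on the first hit; the result is independent of the set's iteration order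
    true
  else false

-- ===== PORT B =====
def pvRulesB : PySem.Dict (List Char) Int :=
  PySem.Dict.ofList [("completions".toList, 0), ("embeddings".toList, 0),
                     ("responses".toList, 1), ("images".toList, 1), ("audio".toList, 1),
                     ("chat".toList, 2)]

def is_allowed_path_py_alt (path : String) : Bool :=
  -- path.lstrip("/"): hand port, exact — drops exactly the leading '/' characters
  let segs := PySem.Chars.splitOn (path.toList.dropWhile (fun c => c == '/')) ['/']
  -- split always returns a nonempty list, so segs[0] is its head
  let head := segs.headD []
  let tail := segs.tail
  let kind := pvRulesB.get? head
  if kind == some 0 then tail == ([] : List (List Char))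
  else if kind == some 1 then true
  else if kind == some 2 then tail == ["completions".toList]
  else false

-- ===== PRECONDITION & SPEC =====
def Spec_is_allowed_path_py (path : String) (out : Bool) : Prop := out = is_allowed_path_py_alt path
instance (path : String) (out : Bool) : Decidable (Spec_is_allowed_path_py path out) := by unfold Spec_is_allowed_path_py; infer_instance

-- ===== CLAIM (what is proved, stated in full; the proofs are below) =====
def Claim_equal_is_allowed_path_py : Prop := ∀ (path : String), Dom_is_allowed_path_py path → Spec_is_allowed_path_py path (is_allowed_path_py path)

-- ===== LEMMAS AND PROOFS =====

-- reference segmentation of a list at '/' (the spec that PySem.Chars.splitOn realizes)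
def pvSegs (l : List Char) : List (List Char) :=
  match h : l.dropWhile (fun c => !(c == '/')) with
  | [] => [l.takeWhile (fun c => !(c == '/'))]
  | _ :: r => l.takeWhile (fun c => !(c == '/')) :: pvSegs r
termination_by l.length
decreasing_by
  have hle : (l.dropWhile (fun c => !(c == '/'))).length ≤ l.length := List.length_dropWhile_le _ _
  rw [h] at hle
  simp at hle
  omega

theorem pvSegs_ne_nil (l : List Char) : pvSegs l ≠ [] := by
  unfold pvSegs
  split <;> simp

theorem pvSegs_head (l : List Char) :
    (pvSegs l).headD [] = l.takeWhile (fun c => !(c == '/')) := by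
  unfold pvSegs
  split <;> simp


theorem pvSegs_eq_nil (l : List Char) (hd : l.dropWhile (fun c => !(c == '/')) = []) :
    pvSegs l = [l.takeWhile (fun c => !(c == '/'))] := by
  conv_lhs => unfold pvSegs
  split
  · rfl
  · rename_i x r h
    rw [hd] at h
    cases h

theorem pvSegs_eq_cons (l : List Char) (x : Char) (r : List Char)
    (hd : l.dropWhile (fun c => !(c == '/')) = x :: r) :
    pvSegs l = l.takeWhile (fun c => !(c == '/')) :: pvSegs r := by
  conv_lhs => unfold pvSegs
  split
  · rename_i h
    rw [hd] at h
    cases h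
  · rename_i y r' h
    rw [hd] at h
    cases h
    rfl

-- splitOn.go realizes pvSegs (cur holds the reversed current segment, acc the finished ones)
theorem go_eq (fuel : Nat) : ∀ (l cur : List Char) (acc : List (List Char)), l.length ≤ fuel →
    PySem.Chars.splitOn.go ['/'] fuel l cur acc
      = acc.reverse ++ ((cur.reverse ++ (pvSegs l).headD []) :: (pvSegs l).tail) := by
  induction fuel with
  | zero =>
    intro l cur acc h
    have : l = [] := List.length_eq_zero_iff.mp (Nat.le_zero.mp h)
    subst this
    simp [PySem.Chars.splitOn.go, pvSegs]
  | succ n ih =>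
    intro l cur acc h
    cases l with
    | nil => simp [PySem.Chars.splitOn.go, pvSegs]
    | cons c rest =>
      simp only [PySem.Chars.splitOn.go]
      by_cases hc : c = '/'
      · subst hc
        rw [if_pos (by simp [List.isPrefixOf])]
        have hdrop : List.drop ['/'].length ('/' :: rest) = rest := rfl
        rw [hdrop, ih rest [] (cur.reverse :: acc) (by simpa using h)]
        have : pvSegs ('/' :: rest) = [] :: pvSegs rest := by
          rw [pvSegs_eq_cons ('/' :: rest) '/' rest (by simp)]
          simp
        rw [this]
        rcases hne : pvSegs rest with _ | ⟨s, t⟩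
        · exact absurd hne (pvSegs_ne_nil rest)
        · simp
      · have hpre : (['/'].isPrefixOf (c :: rest)) = false := by
          simp [List.isPrefixOf]; exact fun he => hc he.symm
        rw [if_neg (by simp [hpre])]
        rw [ih rest (c :: cur) acc (by simpa using h)]
        have htk : (c :: rest).takeWhile (fun c => !(c == '/')) = c :: rest.takeWhile (fun c => !(c == '/')) := by
          rw [List.takeWhile_cons, if_pos (by simp [hc])]
        have hdw : (c :: rest).dropWhile (fun c => !(c == '/')) = rest.dropWhile (fun c => !(c == '/')) := by
          rw [List.dropWhile_cons, if_pos (by simp [hc])]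
        have : pvSegs (c :: rest) = (c :: (pvSegs rest).headD []) :: (pvSegs rest).tail := by
          rcases hd : rest.dropWhile (fun c => !(c == '/')) with _ | ⟨x, r⟩
          · rw [pvSegs_eq_nil (c :: rest) (hdw.trans hd), pvSegs_eq_nil rest hd, htk]
            simp
          · rw [pvSegs_eq_cons (c :: rest) x r (hdw.trans hd), pvSegs_eq_cons rest x r hd, htk]
            simp
        rw [this]
        simp

theorem splitOn_eq_pvSegs (l : List Char) :
    PySem.Chars.splitOn l ['/'] = pvSegs l := by
  unfold PySem.Chars.splitOn
  rw [go_eq (l.length + 1) l [] [] (by omega)]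
  rcases hne : pvSegs l with _ | ⟨s, t⟩
  · exact absurd hne (pvSegs_ne_nil l)
  · simp

-- cs equals a '/'-free literal iff its first segment is that literal and there is no '/'
theorem eq_lit (p : List Char) (hp : '/' ∉ p) (cs : List Char) :
    cs = p ↔ (cs.takeWhile (fun c => !(c == '/')) = p ∧ cs.dropWhile (fun c => !(c == '/')) = []) := by
  constructor
  · rintro rfl
    constructor
    · exact List.takeWhile_eq_self_iff.mpr (fun a ha => by simp; exact fun h => hp (h ▸ ha))
    · exact List.dropWhile_eq_nil_iff.mpr (fun a ha => by simp; exact fun h => hp (h ▸ ha))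
  · rintro ⟨ht, hd⟩
    have := List.takeWhile_append_dropWhile (p := fun c => !(c == '/')) (l := cs)
    rw [ht, hd] at this
    simpa using this.symm

-- the tail of the segmentation is [q] ('/'-free q) iff cs = head ++ '/' ++ q
theorem tail_single (q : List Char) (hq : '/' ∉ q) (cs : List Char) :
    (pvSegs cs).tail = [q] ↔ cs.dropWhile (fun c => !(c == '/')) = '/' :: q := by
  rcases hd : cs.dropWhile (fun c => !(c == '/')) with _ | ⟨c, r⟩
  · rw [pvSegs_eq_nil cs hd]
    simp
  · have hc : c = '/' := by
      have h0 := List.dropWhile_get_zero_not (p := fun c => !(c == '/')) cs (by rw [hd]; simp)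
      simpa [hd] using h0
    subst hc
    rw [pvSegs_eq_cons cs '/' r hd]
    simp only [List.tail_cons, List.cons.injEq, true_and]
    constructor
    · intro h
      -- pvSegs r = [q] → r = q
      rcases hr : r.dropWhile (fun c => !(c == '/')) with _ | ⟨x, r'⟩
      · rw [pvSegs_eq_nil r hr] at h
        have ht : r.takeWhile (fun c => !(c == '/')) = q := by simpa using h
        have : r = q := (eq_lit q hq r).mpr ⟨ht, hr⟩
        simp [this]
      · rw [pvSegs_eq_cons r x r' hr] at h
        have := pvSegs_ne_nil r'
        simp at h
        exact absurd h.2 this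
    · intro h
      have hr' : '/' ∉ r := by rw [h]; exact hq
      have hd' : r.dropWhile (fun c => !(c == '/')) = [] :=
        List.dropWhile_eq_nil_iff.mpr (fun a ha => by simp; exact fun hx => hr' (hx ▸ ha))
      have ht' : r.takeWhile (fun c => !(c == '/')) = r :=
        List.takeWhile_eq_self_iff.mpr (fun a ha => by simp; exact fun hx => hr' (hx ▸ ha))
      rw [pvSegs_eq_nil r hd', ht', h]

-- cs = p ++ '/' :: q (p, q '/'-free) iff first segment is p and the rest is '/' :: q
theorem eq_lit2 (p q : List Char) (hp : '/' ∉ p) (cs : List Char) :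
    cs = p ++ '/' :: q ↔ (cs.takeWhile (fun c => !(c == '/')) = p ∧ cs.dropWhile (fun c => !(c == '/')) = '/' :: q) := by
  constructor
  · rintro rfl
    constructor
    · rw [List.takeWhile_append]
      rw [List.takeWhile_eq_self_iff.mpr (fun a ha => by simp; exact fun h => hp (h ▸ ha))]
      simp
    · rw [List.dropWhile_append]
      rw [List.dropWhile_eq_nil_iff.mpr (fun a ha => by simp; exact fun h => hp (h ▸ ha))]
      simp
  · rintro ⟨ht, hd⟩
    have := List.takeWhile_append_dropWhile (p := fun c => !(c == '/')) (l := cs)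
    rw [ht, hd] at this
    exact this.symm

-- first-segment test ⟺ A's equality-or-startswith test, for any prefix not containing '/'
theorem seg_iff (p : List Char) (hp : '/' ∉ p) : ∀ (cs : List Char),
    (cs.takeWhile (fun c => !(c == '/')) = p ↔ (cs = p ∨ (p ++ ['/']) <+: cs)) := by
  induction p with
  | nil =>
    intro cs
    cases cs with
    | nil => simp
    | cons c t =>
      rw [List.takeWhile_cons]
      by_cases hc : c = '/'
      · subst hc; simp [List.cons_prefix_cons]
      · simp [hc, List.cons_prefix_cons]
        exact fun h => hc h.symm
  | cons a p' ih =>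
    intro cs
    have ha : a ≠ '/' := fun h => hp (h ▸ List.mem_cons_self)
    have hp' : '/' ∉ p' := fun h => hp (List.mem_cons_of_mem _ h)
    cases cs with
    | nil => simp
    | cons c t =>
      rw [List.takeWhile_cons]
      by_cases hc : c = '/'
      · subst hc
        simp [List.cons_prefix_cons, ha, Ne.symm ha]
      · rw [if_pos (by simp [hc])]
        simp only [List.cons.injEq, List.cons_prefix_cons, List.cons_append]
        rw [ih hp' t]
        constructor
        · rintro ⟨rfl, h | h⟩
          · exact Or.inl ⟨rfl, h⟩
          · exact Or.inr ⟨rfl, h⟩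
        · rintro (⟨rfl, rfl⟩ | ⟨rfl, h⟩)
          · exact ⟨rfl, Or.inl rfl⟩
          · exact ⟨rfl, Or.inr h⟩

set_option maxHeartbeats 1000000 in
theorem key (cs : List Char) :
    (if PySem.Set.contains pvExactA cs then true
     else if pvPrefixesA.any
         (fun prefix_ => cs == prefix_ || PySem.Chars.startswith cs (prefix_ ++ ['/'])) then true
     else false)
    = (let segs := PySem.Chars.splitOn cs ['/']
       let head := segs.headD []
       let tail := segs.tail
       let kind := pvRulesB.get? head
       if kind == some 0 then tail == ([] : List (List Char))
       else if kind == some 1 then true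
       else if kind == some 2 then tail == ["completions".toList]
       else false) := by
  simp only [splitOn_eq_pvSegs, pvSegs_head]
  set t := cs.takeWhile (fun c => !(c == '/')) with hT
  have hA : (if PySem.Set.contains pvExactA cs then true
      else if pvPrefixesA.any
          (fun prefix_ => cs == prefix_ || PySem.Chars.startswith cs (prefix_ ++ ['/'])) then true
      else false) = true
      ↔ (cs = "chat/completions".toList ∨ cs = "completions".toList ∨ cs = "embeddings".toList
         ∨ t = "responses".toList ∨ t = "images".toList ∨ t = "audio".toList) := by
    have s1 := seg_iff "responses".toList (by decide) cs
    have s2 := seg_iff "images".toList (by decide) cs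
    have s3 := seg_iff "audio".toList (by decide) cs
    rw [← hT] at s1 s2 s3
    have eA : pvExactA = ["chat/completions".toList, "completions".toList, "embeddings".toList] := rfl
    have pA : pvPrefixesA = ["responses".toList, "images".toList, "audio".toList] := rfl
    rw [eA, pA]
    simp only [PySem.Set.contains, PySem.Chars.startswith, List.any_cons, List.any_nil,
      List.contains_cons, List.contains_nil, Bool.or_false]
    split_ifs with hE hP
    · simp only [Bool.or_eq_true, beq_iff_eq] at hE
      refine iff_of_true rfl ?_
      rcases hE with h | h | h
      · exact Or.inl h
      · exact Or.inr (Or.inl h)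
      · exact Or.inr (Or.inr (Or.inl h))
    · simp only [Bool.or_eq_true, beq_iff_eq, List.isPrefixOf_iff_prefix] at hP
      rw [← s1, ← s2, ← s3] at hP
      refine iff_of_true rfl ?_
      rcases hP with h | h | h
      · exact Or.inr (Or.inr (Or.inr (Or.inl h)))
      · exact Or.inr (Or.inr (Or.inr (Or.inr (Or.inl h))))
      · exact Or.inr (Or.inr (Or.inr (Or.inr (Or.inr h))))
    · simp only [Bool.or_eq_true, beq_iff_eq] at hE
      simp only [Bool.or_eq_true, beq_iff_eq, List.isPrefixOf_iff_prefix] at hP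
      rw [← s1, ← s2, ← s3] at hP
      refine iff_of_false (by simp) ?_
      rintro (h | h | h | h | h | h)
      · exact hE (Or.inl h)
      · exact hE (Or.inr (Or.inl h))
      · exact hE (Or.inr (Or.inr h))
      · exact hP (Or.inl h)
      · exact hP (Or.inr (Or.inl h))
      · exact hP (Or.inr (Or.inr h))
  have hcc : ("chat/completions".toList : List Char) = "chat".toList ++ '/' :: "completions".toList := by decide
  have e1 := eq_lit "completions".toList (by decide) cs
  have e2 := eq_lit "embeddings".toList (by decide) cs
  have e3 := (eq_lit2 "chat".toList "completions".toList (by decide) cs)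
  have ts := tail_single "completions".toList (by decide) cs
  rw [← hT] at e1 e2 e3
  rw [Bool.eq_iff_iff, hA]
  by_cases h1 : t = "completions".toList
  · have hk : pvRulesB.get? t = some 0 := by rw [h1]; rfl
    rw [hk, if_pos (by decide)]
    simp only [beq_iff_eq]
    constructor
    · rintro (h | h | h | h | h | h)
      · exact absurd (h1.symm.trans (by rw [hT, h] <;> decide)) (by decide)
      · have hd0 : cs.dropWhile (fun c => !(c == '/')) = [] := by rw [h] <;> decide
        rw [pvSegs_eq_nil cs hd0]
        rfl
      · exact absurd (h1.symm.trans (by rw [hT, h] <;> decide)) (by decide)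
      · exact absurd (h1.symm.trans h) (by decide)
      · exact absurd (h1.symm.trans h) (by decide)
      · exact absurd (h1.symm.trans h) (by decide)
    · intro h
      have hd0 : cs.dropWhile (fun c => !(c == '/')) = [] := by
        rcases hd : cs.dropWhile (fun c => !(c == '/')) with _ | ⟨x, r⟩
        · rfl
        · rw [pvSegs_eq_cons cs x r hd] at h
          exact absurd (by simpa using h) (pvSegs_ne_nil r)
      exact Or.inr (Or.inl (e1.mpr ⟨h1, hd0⟩))
  by_cases h2 : t = "embeddings".toList
  · have hk : pvRulesB.get? t = some 0 := by rw [h2]; rfl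
    rw [hk, if_pos (by decide)]
    simp only [beq_iff_eq]
    constructor
    · rintro (h | h | h | h | h | h)
      · exact absurd (h2.symm.trans (by rw [hT, h] <;> decide)) (by decide)
      · exact absurd (h2.symm.trans (by rw [hT, h] <;> decide)) (by decide)
      · have hd0 : cs.dropWhile (fun c => !(c == '/')) = [] := by rw [h] <;> decide
        rw [pvSegs_eq_nil cs hd0]
        rfl
      · exact absurd (h2.symm.trans h) (by decide)
      · exact absurd (h2.symm.trans h) (by decide)
      · exact absurd (h2.symm.trans h) (by decide)
    · intro h
      have hd0 : cs.dropWhile (fun c => !(c == '/')) = [] := by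
        rcases hd : cs.dropWhile (fun c => !(c == '/')) with _ | ⟨x, r⟩
        · rfl
        · rw [pvSegs_eq_cons cs x r hd] at h
          exact absurd (by simpa using h) (pvSegs_ne_nil r)
      exact Or.inr (Or.inr (Or.inl (e2.mpr ⟨h2, hd0⟩)))
  by_cases h3 : t = "responses".toList
  · have hk : pvRulesB.get? t = some 1 := by rw [h3]; rfl
    rw [hk, if_neg (by decide), if_pos (by decide)]
    exact iff_of_true (Or.inr (Or.inr (Or.inr (Or.inl h3)))) rfl
  by_cases h4 : t = "images".toList
  · have hk : pvRulesB.get? t = some 1 := by rw [h4]; rfl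
    rw [hk, if_neg (by decide), if_pos (by decide)]
    exact iff_of_true (Or.inr (Or.inr (Or.inr (Or.inr (Or.inl h4))))) rfl
  by_cases h5 : t = "audio".toList
  · have hk : pvRulesB.get? t = some 1 := by rw [h5]; rfl
    rw [hk, if_neg (by decide), if_pos (by decide)]
    exact iff_of_true (Or.inr (Or.inr (Or.inr (Or.inr (Or.inr h5))))) rfl
  by_cases h6 : t = "chat".toList
  · have hk : pvRulesB.get? t = some 2 := by rw [h6]; rfl
    rw [hk, if_neg (by decide), if_neg (by decide), if_pos (by decide)]
    simp only [beq_iff_eq, ts]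
    constructor
    · rintro (h | h | h | h | h | h)
      · rw [h] <;> decide
      · exact absurd (h6.symm.trans (by rw [hT, h] <;> decide)) (by decide)
      · exact absurd (h6.symm.trans (by rw [hT, h] <;> decide)) (by decide)
      · exact absurd (h6.symm.trans h) (by decide)
      · exact absurd (h6.symm.trans h) (by decide)
      · exact absurd (h6.symm.trans h) (by decide)
    · intro h
      exact Or.inl (by rw [hcc]; exact e3.mpr ⟨h6, h⟩)
  · have hk : pvRulesB.get? t = none := by
      have hmk : pvRulesB = PySem.Dict.mk
          [("completions".toList, (0 : Int)), ("embeddings".toList, 0), ("responses".toList, 1),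
           ("images".toList, 1), ("audio".toList, 1), ("chat".toList, 2)] := by decide
      rw [hmk]
      simp only [PySem.Dict.get?_mk_cons]
      rw [if_neg (by simp; exact fun hx => h1 hx.symm), if_neg (by simp; exact fun hx => h2 hx.symm),
        if_neg (by simp; exact fun hx => h3 hx.symm), if_neg (by simp; exact fun hx => h4 hx.symm),
        if_neg (by simp; exact fun hx => h5 hx.symm), if_neg (by simp; exact fun hx => h6 hx.symm)]
      simp [PySem.Dict.get?]
    rw [hk, if_neg (by decide), if_neg (by decide), if_neg (by decide)]
    refine iff_of_false ?_ (by simp)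
    rintro (h | h | h | h | h | h)
    · exact h6 ((by rw [hT, h] <;> decide : t = "chat".toList))
    · exact h1 ((by rw [hT, h] <;> decide : t = "completions".toList))
    · exact h2 ((by rw [hT, h] <;> decide : t = "embeddings".toList))
    · exact h3 h
    · exact h4 h
    · exact h5 h

-- ===== VERDICT (by name: the statement is the Claim_ definition above) =====
theorem is_allowed_path_py_spec : Claim_equal_is_allowed_path_py := by
  intro path _
  show is_allowed_path_py path = is_allowed_path_py_alt path
  exact key (path.toList.dropWhile (fun c => c == '/'))
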